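-- pv_equiv track=rewrite | github.com/Jumaruba/URI | Programação em python_URI_1110 (accepted).py | carta_sobrante
-- ===== SOURCE A (Python) =====
-- def carta_sobrante(x):
--     vetor = []
--     descartadas = []
--     for i in range(1, x + 1):
--         vetor.append(i)
--     for j in range(1, x):
--         descartada = vetor.pop(0)
--         descartadas.append(descartada)
--         final = vetor.pop(0)
--         vetor.append(final)
--     return vetor[0], descartadas
-- ===== SOURCE B (Python) =====
-- def carta_sobrante(x):
--     vetor = list(range(1, x + 1))
--     descartadas = []
--     pos = 0
--     while len(vetor) > 1:
--         descartadas.append(vetor.pop(pos))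
--         pos = (pos % len(vetor) + 1) % len(vetor)
--     return vetor[0], descartadas
-- ===== Notes on version B (the rewrite author's own statement) =====
-- stated objective: alternative
-- what changed: B replaces A's FIFO queue simulation (pop(0) + append to rotate the survivor to the back) by a circular index over a shrinking static list: pop at pos, then advance pos modularly to skip the survivor; no element is ever moved to the back.
-- outside the precondition, e.g. on carta_sobrante(0): A raises IndexError, B raises IndexError
import Mathlib
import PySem

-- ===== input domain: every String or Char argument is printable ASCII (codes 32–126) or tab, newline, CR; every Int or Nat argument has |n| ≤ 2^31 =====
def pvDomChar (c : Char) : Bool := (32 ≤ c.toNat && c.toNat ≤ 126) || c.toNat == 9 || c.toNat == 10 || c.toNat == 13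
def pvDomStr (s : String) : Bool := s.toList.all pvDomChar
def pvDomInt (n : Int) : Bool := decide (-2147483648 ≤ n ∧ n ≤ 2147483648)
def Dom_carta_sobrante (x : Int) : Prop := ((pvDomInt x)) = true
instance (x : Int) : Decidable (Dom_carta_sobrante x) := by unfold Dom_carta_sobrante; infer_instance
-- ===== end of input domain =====

-- B replaces A's FIFO-queue rotation by a circular index over a shrinking list (alternative decomposition, same cost).

-- ===== PORT A =====
-- A's loop body: descartada = vetor.pop(0); descartadas.append(descartada); final = vetor.pop(0); vetor.append(final).
-- The pop(0)s raise only when vetor has < 2 elements, which for x ≥ 1 never happens; those branches return the state.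
def cartaLoopA : Nat → List Int → List Int → List Int × List Int
  | 0, vetor, des => (vetor, des)
  | n+1, vetor, des =>
    match vetor with
    | a :: b :: rest => cartaLoopA n (rest ++ [b]) (des ++ [a])
    | [a] => cartaLoopA n [] (des ++ [a])
    | [] => ([], des)

def carta_sobrante (x : Int) : Int × List Int :=
  let vetor := PySem.List.pyRange 1 (x + 1) 1
  let st := cartaLoopA (x - 1).toNat vetor []
  ((PySem.List.pyGet? st.1 0).getD 0, st.2)

-- ===== PORT B =====
-- while len(vetor) > 1: descartadas.append(vetor.pop(pos)); pos = (pos % len(vetor) + 1) % len(vetor).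
-- pos < len(vetor) is an invariant starting from pos = 0; the pos-out-of-range branch (Python's pop IndexError) is unreachable.
def cartaLoopB (vetor : List Int) (pos : Nat) (des : List Int) : List Int × List Int :=
  if 1 < vetor.length then
    if hp : pos < vetor.length then
      let card := vetor.getD pos 0
      let v' := vetor.eraseIdx pos
      cartaLoopB v' ((pos % v'.length + 1) % v'.length) (des ++ [card])
    else (vetor, des)
  else (vetor, des)
termination_by vetor.length
decreasing_by simp [List.length_eraseIdx_of_lt hp]; omega

def carta_sobrante_alt (x : Int) : Int × List Int :=
  let vetor := PySem.List.pyRange 1 (x + 1) 1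
  let st := cartaLoopB vetor 0 []
  ((PySem.List.pyGet? st.1 0).getD 0, st.2)

-- ===== PRECONDITION & SPEC =====
-- For x ≤ 0 the deck is empty and A raises IndexError at vetor[0]; Pre_ excludes exactly those inputs.
def Pre_carta_sobrante (x : Int) : Prop := 1 ≤ x
instance (x : Int) : Decidable (Pre_carta_sobrante x) := by unfold Pre_carta_sobrante; infer_instance
def pvWitness_carta_sobrante : Int := (7)

def Spec_carta_sobrante (x : Int) (out : Int × List Int) : Prop := out = carta_sobrante_alt x
instance (x : Int) (out : Int × List Int) : Decidable (Spec_carta_sobrante x out) := by unfold Spec_carta_sobrante; infer_instance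

-- ===== CLAIM (what is proved, stated in full; the proofs are below) =====
def Claim_equal_carta_sobrante : Prop := ∀ (x : Int), Dom_carta_sobrante x → Pre_carta_sobrante x → Spec_carta_sobrante x (carta_sobrante x)

-- ===== LEMMAS AND PROOFS =====

-- Popping at index pos from B's list v is the head of A's queue v.rotate pos, with the remainder still rotated by pos.
lemma rot_shape (v : List Int) (pos : Nat) (h : pos < v.length) :
    v.rotate pos = v[pos] :: (v.eraseIdx pos).rotate pos := by
  have h1 : pos ≤ (v.eraseIdx pos).length := by
    rw [List.length_eraseIdx_of_lt h]; omega
  rw [List.rotate_eq_drop_append_take (le_of_lt h),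
      List.rotate_eq_drop_append_take h1,
      List.eraseIdx_eq_take_drop_succ]
  have htl : (List.take pos v).length = pos := by simp; omega
  rw [List.drop_left' htl, List.take_left' htl, List.drop_eq_getElem_cons h, List.cons_append]

-- Invariant: A's queue is B's list rotated by B's pointer, and A's remaining fuel is B's length − 1.
lemma loop_eq : ∀ (n : Nat) (v : List Int) (pos : Nat) (des : List Int),
    v.length = n → pos < v.length →
    cartaLoopA (v.length - 1) (v.rotate pos) des = cartaLoopB v pos des := by
  intro n
  induction n using Nat.strong_induction_on with
  | _ n ih =>
    intro v pos des hn hpos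
    by_cases h : 1 < v.length
    · set v' := v.eraseIdx pos with hv'
      have hlv' : v'.length = v.length - 1 := by rw [hv', List.length_eraseIdx_of_lt hpos]
      have hm : 0 < v'.length := by omega
      have hrot := rot_shape v pos hpos
      obtain ⟨b, rest, ht⟩ := List.exists_cons_of_ne_nil
        (List.ne_nil_of_length_pos (by rw [List.length_rotate]; omega) : v'.rotate pos ≠ [])
      have hlen : v.length - 1 = (v'.length - 1) + 1 := by omega
      have hstepA : cartaLoopA (v.length - 1) (v.rotate pos) des
          = cartaLoopA (v'.length - 1) (v'.rotate ((pos % v'.length + 1) % v'.length)) (des ++ [v[pos]]) := by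
        rw [hlen, hrot, ht]
        show cartaLoopA _ (v[pos] :: b :: rest) des = _
        rw [cartaLoopA]
        have : rest ++ [b] = v'.rotate ((pos % v'.length + 1) % v'.length) := by
          have h1 : (b :: rest).rotate 1 = rest ++ [b] := by
            rw [List.rotate_cons_succ, List.rotate_zero]
          rw [← h1, ← ht, List.rotate_rotate, ← List.rotate_mod]
          congr 1
          rw [Nat.mod_add_mod]
        rw [this]
      have hstepB : cartaLoopB v pos des
          = cartaLoopB v' ((pos % v'.length + 1) % v'.length) (des ++ [v[pos]]) := by
        rw [cartaLoopB]
        simp only [if_pos h, dif_pos hpos]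
        rw [List.getD_eq_getElem v 0 hpos]
      rw [hstepA, hstepB]
      exact ih v'.length (by omega) v' _ _ rfl (Nat.mod_lt _ hm)
    · have h1 : v.length = 1 := by omega
      rw [cartaLoopB]
      simp only [if_neg h]
      have : pos = 0 := by omega
      subst this
      rw [List.rotate_zero, h1]
      rfl

-- ===== VERDICT (by name: the statement is the Claim_ definition above) =====
theorem carta_sobrante_spec : Claim_equal_carta_sobrante := by
  intro x _ hx
  unfold Spec_carta_sobrante carta_sobrante carta_sobrante_alt
  set v := PySem.List.pyRange 1 (x + 1) 1 with hv
  have hl : v.length = x.toNat := by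
    rw [hv, PySem.List.length_pyRange_one]; congr 1; omega
  have h0 : 0 < v.length := by
    have : 1 ≤ x := hx
    omega
  have hfuel : (x - 1).toNat = v.length - 1 := by
    have : 1 ≤ x := hx
    omega
  have hloop := loop_eq v.length v 0 [] rfl h0
  rw [List.rotate_zero] at hloop
  simp only [hfuel, hloop]
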